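-- pv_equiv track=rewrite | github.com/negin-mgdm/HyperionDev-Imperial-Training-Material-Level-1 | L1T16 - Recursion/sum_recursion.py | adding_up_to
-- ===== SOURCE A (Python) =====
-- def adding_up_to(array, counter):
--     # Base case: If the 'counter' reaches -1, return 0.
--     if counter == -1:
--         return 0
--
--     # Get the current value from the first element of the 'array'.
--     current = array[0]
--
--     # Create a new list 'new_array' containing all elements from 'array' except the first one.
--     new_array = array[1:]
--     # Recursively call 'adding_up_to' with the reduced 'new_array' and decremented 'counter'.
--     add_up_to = adding_up_to(new_array, counter - 1)
--
--     # Calculate the result by adding 'current' and 'add_up_to'.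
--     result = current + add_up_to
--     return result
-- ===== SOURCE B (Python) =====
-- def adding_up_to(array, counter):
--     total = 0
--     for i in range(counter + 1):
--         total += array[i]
--     return total
-- ===== Notes on version B (the rewrite author's own statement) =====
-- stated objective: faster
-- what changed: Replaces the recursion that copies the tail of the list with array[1:] at every step by a single accumulator loop over the first counter+1 indices.
import Mathlib
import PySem

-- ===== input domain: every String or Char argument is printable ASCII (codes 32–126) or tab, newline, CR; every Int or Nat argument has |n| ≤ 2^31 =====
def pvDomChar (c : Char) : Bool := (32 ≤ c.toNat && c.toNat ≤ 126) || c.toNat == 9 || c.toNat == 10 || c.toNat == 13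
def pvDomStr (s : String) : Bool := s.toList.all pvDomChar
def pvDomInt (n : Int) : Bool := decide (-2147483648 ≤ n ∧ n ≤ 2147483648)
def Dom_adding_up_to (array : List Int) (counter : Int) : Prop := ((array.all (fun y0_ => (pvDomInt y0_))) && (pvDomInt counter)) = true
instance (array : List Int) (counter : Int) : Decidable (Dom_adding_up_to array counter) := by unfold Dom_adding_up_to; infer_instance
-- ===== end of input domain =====

-- B replaces A's recursion, which copies the tail of the list with array[1:] at every step,
-- by a single accumulator loop over the first counter+1 indices.

-- ===== PORT A =====
-- Python A recurses with array[1:] and counter-1 until counter == -1; when counter ≠ -1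
-- and the list is empty, array[0] raises IndexError (excluded by Pre_; the [] branch here
-- is that raising path).
def adding_up_to (array : List Int) (counter : Int) : Int :=
  if counter = -1 then 0
  else
    match array with
    | [] => 0            -- array[0]: IndexError in Python; outside Pre_
    | current :: new_array => current + adding_up_to new_array (counter - 1)

-- ===== PORT B =====
-- total = 0; for i in range(counter+1): total += array[i]; return total
-- (array[i] raises IndexError when counter ≥ len(array); excluded by Pre_, pyGetD's
-- default is never used inside Pre_)
def adding_up_to_alt (array : List Int) (counter : Int) : Int :=
  (PySem.List.pyRange 0 (counter + 1) 1).foldl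
    (fun total i => total + PySem.List.pyGetD array i 0) 0

-- ===== PRECONDITION & SPEC =====
-- Pre_ excludes exactly the inputs where Python A raises IndexError (the list runs out
-- before counter reaches -1: counter ≥ len(array), or counter < -1).
def Pre_adding_up_to (array : List Int) (counter : Int) : Prop :=
  -1 ≤ counter ∧ counter < (array.length : Int)
instance (array : List Int) (counter : Int) : Decidable (Pre_adding_up_to array counter) := by
  unfold Pre_adding_up_to; infer_instance

def pvWitness_adding_up_to : List Int × Int := ([3, -1, 4], 1)

def Spec_adding_up_to (array : List Int) (counter : Int) (out : Int) : Prop :=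
  out = adding_up_to_alt array counter
instance (array : List Int) (counter : Int) (out : Int) : Decidable (Spec_adding_up_to array counter out) := by
  unfold Spec_adding_up_to; infer_instance

-- ===== CLAIM (what is proved, stated in full; the proofs are below) =====
def Claim_equal_adding_up_to : Prop := ∀ (array : List Int) (counter : Int), Dom_adding_up_to array counter → Pre_adding_up_to array counter → Spec_adding_up_to array counter (adding_up_to array counter)

-- ===== LEMMAS AND PROOFS =====

-- A equals the sum of the first (counter+1) elements, for counter in range.
theorem adding_up_to_eq_sum_take (array : List Int) (counter : Int)
    (h1 : -1 ≤ counter) (h2 : counter < (array.length : Int)) :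
    adding_up_to array counter = (array.take (counter + 1).toNat).sum := by
  induction array generalizing counter with
  | nil =>
    have hc : counter = -1 := by simp at h2; omega
    subst hc; simp [adding_up_to]
  | cons x rest ih =>
    by_cases hc : counter = -1
    · subst hc; simp [adding_up_to]
    · have h0 : 0 ≤ counter := by omega
      have : (counter + 1).toNat = counter.toNat + 1 := by omega
      rw [adding_up_to, if_neg hc, this, List.take_succ_cons, List.sum_cons]
      have : counter.toNat = (counter - 1 + 1).toNat := by omega
      rw [this, ih (counter - 1) (by omega) (by simp at h2 ⊢; omega)]

-- B's loop equals the sum of the first n elements, for n ≤ length.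
theorem alt_loop_eq_sum_take (array : List Int) (n : Nat) (h : n ≤ array.length) :
    (PySem.List.pyRange 0 (n : Int) 1).foldl
      (fun total i => total + PySem.List.pyGetD array i 0) 0 = (array.take n).sum := by
  induction n with
  | zero => simp [PySem.List.pyRange_one_eq_nil]
  | succ m ih =>
    have hcast : ((m + 1 : Nat) : Int) = (m : Int) + 1 := by push_cast; ring
    rw [hcast, PySem.List.pyRange_one_succ_right (by positivity), List.foldl_append,
      ih (by omega)]
    have hm : m < array.length := by omega
    rw [List.take_add_one, List.sum_append, List.getElem?_eq_getElem hm]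
    simp [PySem.List.pyGetD_natCast, List.getD, List.getElem?_eq_getElem hm]

-- ===== VERDICT (by name: the statement is the Claim_ definition above) =====
theorem adding_up_to_spec : Claim_equal_adding_up_to := by
  intro array counter _ hpre
  obtain ⟨h1, h2⟩ := hpre
  unfold Spec_adding_up_to adding_up_to_alt
  have hn : counter + 1 = (((counter + 1).toNat : Nat) : Int) := by omega
  rw [hn, alt_loop_eq_sum_take array (counter + 1).toNat (by omega)]
  exact adding_up_to_eq_sum_take array counter h1 h2
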